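-- pv_equiv track=rewrite | github.com/ray-project/deltacat | deltacat/benchmarking/test_benchmark_pipeline.py | _generate_quartiles
-- ===== SOURCE A (Python) =====
-- import math
--
-- def _generate_quartiles(keys):
--     sorted_keys = sorted(keys)
--     size = len(keys)
--     starts = list(range(0, size, math.ceil(size / 4)))
--     ends = list([x - 1 for x in starts[1:]])
--     ends.append(size - 1)
--     quartiles = list(zip(starts, ends))
--     return [(sorted_keys[start], sorted_keys[end]) for (start, end) in quartiles]
-- ===== SOURCE B (Python) =====
-- import math
--
--
-- def _med3(a, b, c):
--     # median of three values, by comparisons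
--     if a <= b:
--         if b <= c:
--             return b
--         return c if a <= c else a
--     else:
--         if a <= c:
--             return a
--         return c if b <= c else b
--
--
-- def _nth(xs, k):
--     # k-th smallest element of xs (0-based), iterative quickselect with
--     # median-of-three pivot; no sorting.
--     while True:
--         p = _med3(xs[0], xs[len(xs) // 2], xs[-1])
--         lt = [x for x in xs if x < p]
--         if k < len(lt):
--             xs = lt
--             continue
--         ceq = xs.count(p)
--         if k < len(lt) + ceq:
--             return p
--         k -= len(lt) + ceq
--         xs = [x for x in xs if x > p]
--
--
-- def _generate_quartiles(keys):
--     n = len(keys)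
--     if n == 0:
--         return []
--     step = (n + 3) // 4
--     out = []
--     i = 0
--     while i < n:
--         j = min(i + step, n) - 1
--         out.append((_nth(keys, i), _nth(keys, j)))
--         i += step
--     return out
-- ===== Notes on version B (the rewrite author's own statement) =====
-- stated objective: alternative
-- what changed: B never sorts: it computes each quartile-boundary value directly with an iterative median-of-three quickselect (three-way partition) over the original list, instead of A's sort-then-index with range/zip scaffolding.
import Mathlib
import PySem

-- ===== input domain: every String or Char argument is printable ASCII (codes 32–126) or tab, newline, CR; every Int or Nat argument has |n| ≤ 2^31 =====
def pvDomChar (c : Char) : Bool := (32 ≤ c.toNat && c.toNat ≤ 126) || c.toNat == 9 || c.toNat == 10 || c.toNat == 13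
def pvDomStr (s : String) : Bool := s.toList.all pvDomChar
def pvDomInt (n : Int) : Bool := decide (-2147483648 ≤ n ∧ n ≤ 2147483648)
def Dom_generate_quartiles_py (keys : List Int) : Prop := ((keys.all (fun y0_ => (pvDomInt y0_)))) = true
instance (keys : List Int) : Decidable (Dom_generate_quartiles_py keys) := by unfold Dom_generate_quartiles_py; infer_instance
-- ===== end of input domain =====

-- B replaces sort-then-index by a sort-free quickselect of the constant set of
-- boundary order statistics (alternative algorithm; not measurably faster in CPython).

-- ===== PORT A =====
-- math.ceil(size / 4) on an int size: exact ceiling division for any list length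
-- (|size| < 2^52, where the float quotient is exact), ported as -((-size) // 4).
def generate_quartiles_py (keys : List Int) : List (Int × Int) :=
  let sorted_keys := PySem.List.sorted keys (fun y => y) false
  let size : Int := keys.length
  let starts := PySem.List.pyRange 0 size (-(PySem.Int.floordiv (-size) 4))
  let ends := (PySem.List.slice starts (some 1) none).map (fun x => x - 1) ++ [size - 1]
  let quartiles := starts.zip ends
  quartiles.map (fun se =>
    (PySem.List.pyGetD sorted_keys se.1 0, PySem.List.pyGetD sorted_keys se.2 0))

-- ===== PORT B =====
def pvMed3 (a b c : Int) : Int :=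
  if a ≤ b then
    if b ≤ c then b else if a ≤ c then c else a
  else
    if a ≤ c then a else if b ≤ c then c else b

lemma pvMed3_mem (a b c : Int) : pvMed3 a b c = a ∨ pvMed3 a b c = b ∨ pvMed3 a b c = c := by
  unfold pvMed3; split_ifs <;> simp

-- cited by pvNth's decreasing_by: filtering out a present element shrinks the list
lemma pvFilter_lt {p : Int → Bool} {l : List Int} {x : Int}
    (h : x ∈ l) (hx : p x = false) : (l.filter p).length < l.length := by
  rcases List.mem_iff_append.mp h with ⟨s, t, rfl⟩
  simp [List.filter_append, hx]
  have h1 := List.length_filter_le p s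
  have h2 := List.length_filter_le p t
  omega

-- cited by pvNth's decreasing_by: the median-of-3 pivot is a member of xs
lemma pvPivot_mem (x : Int) (rest : List Int) :
    pvMed3 x (PySem.List.pyGetD (x :: rest) (PySem.Int.floordiv ((x :: rest).length : Int) 2) 0)
      (PySem.List.pyGetD (x :: rest) (-1) 0) ∈ x :: rest := by
  rcases pvMed3_mem x (PySem.List.pyGetD (x :: rest) (PySem.Int.floordiv ((x :: rest).length : Int) 2) 0)
      (PySem.List.pyGetD (x :: rest) (-1) 0) with h | h | h <;> rw [h]
  · exact List.mem_cons_self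
  · refine PySem.List.pyGetD_mem _ _ ?_
    rw [PySem.Int.floordiv_eq_ediv_of_pos (by omega)]
    refine ⟨?_, ?_⟩ <;> (simp; omega)
  · exact PySem.List.pyGetD_mem _ _ (by refine ⟨?_, ?_⟩ <;> simp)

-- quickselect: k-th smallest of xs (0-based), median-of-3 pivot, three-way partition
def pvNth : List Int → Nat → Int
  | [], _ => 0
  | x :: rest, k =>
    let xs := x :: rest
    let p := pvMed3 x (PySem.List.pyGetD xs (PySem.Int.floordiv (xs.length : Int) 2) 0)
                     (PySem.List.pyGetD xs (-1) 0)
    let lt := xs.filter (fun y => y < p)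
    if k < lt.length then pvNth lt k
    else
      let ceq := PySem.List.count xs p
      if k < lt.length + ceq then p
      else pvNth (xs.filter (fun y => p < y)) (k - lt.length - ceq)
termination_by xs _ => xs.length
decreasing_by
  · exact pvFilter_lt (pvPivot_mem x rest) (by simp)
  · exact pvFilter_lt (pvPivot_mem x rest) (by simp)

def pvQuartLoop (keys : List Int) (n s : Nat) (hs : 0 < s) (i : Nat) : List (Int × Int) :=
  if i < n then
    (pvNth keys i, pvNth keys (min (i + s) n - 1)) :: pvQuartLoop keys n s hs (i + s)
  else []
termination_by n - i
decreasing_by omega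

def generate_quartiles_py_alt (keys : List Int) : List (Int × Int) :=
  let n := keys.length
  if h : n = 0 then []
  else pvQuartLoop keys n ((n + 3) / 4) (by omega) 0

-- ===== PRECONDITION & SPEC =====
-- Pre_ excludes only the empty list, on which A raises ValueError (range() with step 0).
def Pre_generate_quartiles_py (keys : List Int) : Prop := keys ≠ []
instance (keys : List Int) : Decidable (Pre_generate_quartiles_py keys) := by
  unfold Pre_generate_quartiles_py; infer_instance
def pvWitness_generate_quartiles_py : List Int := [3, 1, 4, 1, 5]

def Spec_generate_quartiles_py (keys : List Int) (out : List (Int × Int)) : Prop :=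
  out = generate_quartiles_py_alt keys
instance (keys : List Int) (out : List (Int × Int)) : Decidable (Spec_generate_quartiles_py keys out) := by
  unfold Spec_generate_quartiles_py; infer_instance

-- ===== CLAIM (what is proved, stated in full; the proofs are below) =====
def Claim_equal_generate_quartiles_py : Prop := ∀ (keys : List Int), Dom_generate_quartiles_py keys → Pre_generate_quartiles_py keys → Spec_generate_quartiles_py keys (generate_quartiles_py keys)

-- ===== LEMMAS AND PROOFS =====

-- sorted(l) splits as sorted(<p) ++ p-replicates ++ sorted(>p)
lemma pvSorted_decomp (l : List Int) (p : Int) :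
    PySem.List.sorted l (fun y => y) false
      = PySem.List.sorted (l.filter (fun y => y < p)) (fun y => y) false
        ++ List.replicate (List.count p l) p
        ++ PySem.List.sorted (l.filter (fun y => p < y)) (fun y => y) false := by
  apply PySem.List.sorted_id_eq_of_perm_of_pairwise
  · have h1 := List.filter_append_perm (fun y => decide (y < p)) l
    have h2 := List.filter_append_perm (fun y => decide (y = p))
      (l.filter (fun y => !decide (y < p)))
    rw [List.filter_filter, List.filter_filter] at h2
    have e1 : l.filter (fun a => decide (a = p) && !decide (a < p))
        = l.filter (fun y => decide (y = p)) :=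
      List.filter_congr (fun a _ => by
        by_cases h : a = p
        · simp [h]
        · simp [h])
    have e2 : l.filter (fun a => !decide (a = p) && !decide (a < p))
        = l.filter (fun y => decide (p < y)) :=
      List.filter_congr (fun a _ => by
        by_cases h : a = p
        · simp [h]
        · simp [h, ← decide_not, decide_eq_decide]; omega)
    rw [e1, e2, List.filter_eq] at h2
    have step1 : (PySem.List.sorted (l.filter (fun y => y < p)) (fun y => y) false
        ++ List.replicate (List.count p l) p
        ++ PySem.List.sorted (l.filter (fun y => p < y)) (fun y => y) false).Perm
        (l.filter (fun y => decide (y < p))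
          ++ (List.replicate (List.count p l) p ++ l.filter (fun y => decide (p < y)))) := by
      rw [List.append_assoc]
      exact (PySem.List.sorted_perm _ _ _).append
        ((List.Perm.refl _).append (PySem.List.sorted_perm _ _ _))
    exact step1.trans ((List.Perm.append_left _ h2).trans h1)
  · rw [List.pairwise_append, List.pairwise_append]
    refine ⟨⟨PySem.List.sorted_pairwise _ _, ?_, ?_⟩, PySem.List.sorted_pairwise _ _, ?_⟩
    · exact List.pairwise_replicate.mpr (Or.inr le_rfl)
    · intro a ha b hb
      rw [PySem.List.mem_sorted, List.mem_filter] at ha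
      have hb' := List.eq_of_mem_replicate hb
      simp at ha; omega
    · intro a ha b hb
      rw [PySem.List.mem_sorted, List.mem_filter] at hb
      simp at hb
      rcases List.mem_append.mp ha with ha | ha
      · rw [PySem.List.mem_sorted, List.mem_filter] at ha
        simp at ha; omega
      · have := List.eq_of_mem_replicate ha
        omega

lemma pvNth_eq (xs : List Int) (k : Nat) (hk : k < xs.length) :
    pvNth xs k = (PySem.List.sorted xs (fun y => y) false).getD k 0 := by
  match xs with
  | [] => simp at hk
  | x :: rest =>
    rw [pvNth]
    set l := x :: rest with hl
    set p := pvMed3 x (PySem.List.pyGetD l (PySem.Int.floordiv (l.length : Int) 2) 0)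
      (PySem.List.pyGetD l (-1) 0) with hpdef
    have hp : p ∈ l := pvPivot_mem x rest
    have hdec := pvSorted_decomp l p
    have hlenlt : (l.filter (fun y => y < p)).length < l.length := pvFilter_lt hp (by simp)
    have hlengt : (l.filter (fun y => p < y)).length < l.length := pvFilter_lt hp (by simp)
    have hc : PySem.List.count l p = List.count p l := rfl
    have hlen : l.length
        = (l.filter (fun y => y < p)).length + List.count p l
          + (l.filter (fun y => p < y)).length := by
      have h' := congrArg List.length hdec
      simp only [PySem.List.length_sorted, List.length_append, List.length_replicate] at h'
      omega
    by_cases h1 : k < (l.filter (fun y => y < p)).length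
    · rw [if_pos h1, hdec]
      rw [List.getD_append _ _ _ _ (by simp [PySem.List.length_sorted]; omega)]
      rw [List.getD_append _ _ _ _ (by simp [PySem.List.length_sorted]; omega)]
      exact pvNth_eq (l.filter (fun y => y < p)) k (by omega)
    · rw [if_neg h1]
      by_cases h2 : k < (l.filter (fun y => y < p)).length + PySem.List.count l p
      · rw [if_pos h2, hdec]
        rw [List.getD_append _ _ _ _ (by simp [PySem.List.length_sorted]; omega)]
        rw [List.getD_append_right _ _ _ _ (by simp [PySem.List.length_sorted]; omega)]
        rw [List.getD_replicate _ (by simp [PySem.List.length_sorted]; omega)]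
      · rw [if_neg h2, hdec]
        rw [List.getD_append_right _ _ _ _ (by simp [PySem.List.length_sorted]; omega)]
        rw [pvNth_eq (l.filter (fun y => p < y)) (k - (l.filter (fun y => y < p)).length
          - PySem.List.count l p) (by omega)]
        congr 1
        simp only [PySem.List.length_sorted, List.length_append, List.length_replicate]
        omega
termination_by xs.length
decreasing_by
  · omega
  · omega

lemma pvRange_cons {i b s : Int} (hs : 0 < s) (h : i < b) :
    PySem.List.pyRange i b s = i :: PySem.List.pyRange (i + s) b s := by
  rw [PySem.List.pyRange_of_pos _ _ hs, PySem.List.pyRange_of_pos _ _ hs, if_pos h]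
  have hdiv : (b - i + s - 1) / s = (b - i - 1) / s + 1 := by
    have := Int.add_mul_ediv_right (b - i - 1) 1 (show s ≠ 0 by omega)
    rw [one_mul] at this
    rw [← this]; ring_nf
  by_cases h2 : i + s < b
  · rw [if_pos h2]
    have hnn : 0 ≤ (b - i - 1) / s := Int.ediv_nonneg (by omega) (by omega)
    have hc : ((b - i + s - 1) / s).toNat = ((b - i - 1) / s).toNat + 1 := by
      rw [hdiv]; omega
    have he : b - (i + s) + s - 1 = b - i - 1 := by ring
    rw [hc, he, List.range_succ_eq_map]
    simp only [List.map_cons, List.map_map]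
    congr 1
    · push_cast; ring
    exact List.map_congr_left (fun k _ => by simp [Function.comp]; ring)
  · rw [if_neg (by omega)]
    have hz : (b - i - 1) / s = 0 := Int.ediv_eq_zero_of_lt (by omega) (by omega)
    have hc : ((b - i + s - 1) / s).toNat = 1 := by rw [hdiv, hz]; rfl
    rw [hc]
    simp

lemma pvRange_nil {i b s : Int} (hs : 0 < s) (h : b ≤ i) :
    PySem.List.pyRange i b s = [] := by
  rw [PySem.List.pyRange_of_pos _ _ hs, if_neg (by omega)]
  simp

lemma pvStep_eq (n : Nat) :
    -(PySem.Int.floordiv (-(n : Int)) 4) = (((n + 3) / 4 : Nat) : Int) := by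
  rw [PySem.Int.neg_floordiv_neg_eq_iff_of_pos (by omega)]
  constructor <;> push_cast <;> omega

lemma pvZip (keys : List Int) (n s : Nat) (hs : 0 < s) (hn : n = keys.length)
    (hne : keys ≠ []) (i : Nat) :
    ((PySem.List.pyRange (i : Int) (n : Int) (s : Int)).zip
       ((PySem.List.slice (PySem.List.pyRange (i : Int) (n : Int) (s : Int)) (some 1) none).map
          (fun x => x - 1) ++ [(n : Int) - 1])).map
      (fun se => (PySem.List.pyGetD (PySem.List.sorted keys (fun y => y) false) se.1 0,
                  PySem.List.pyGetD (PySem.List.sorted keys (fun y => y) false) se.2 0)) =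
    pvQuartLoop keys n s hs i := by
  have hsZ : (0 : Int) < (s : Int) := by exact_mod_cast hs
  by_cases h : i < n
  · have hiZ : (i : Int) < (n : Int) := by exact_mod_cast h
    rw [pvQuartLoop, if_pos h]
    by_cases h2 : i + s < n
    · have hA : PySem.List.pyRange ((i : Int) + s) n s
          = ((i : Int) + s) :: PySem.List.pyRange ((i : Int) + s + s) n s :=
        pvRange_cons hsZ (by omega)
      have ih := pvZip keys n s hs hn hne (i + s)
      rw [pvRange_cons hsZ hiZ]
      simp only [PySem.List.slice_from_one, List.tail_cons] at ih ⊢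
      push_cast at ih
      rw [hA] at ih ⊢
      simp only [List.tail_cons] at ih
      simp only [List.map_cons, List.cons_append, List.zip_cons_cons, List.map_cons]
      rw [ih]
      congr 1
      have hmin : min (i + s) n - 1 = i + s - 1 := by omega
      rw [hmin]
      have e2 : (i : Int) + (s : Int) - 1 = ((i + s - 1 : Nat) : Int) := by omega
      rw [e2, PySem.List.pyGetD_natCast, PySem.List.pyGetD_natCast]
      rw [pvNth_eq keys i (by omega), pvNth_eq keys (i + s - 1) (by omega)]
    · have hA : PySem.List.pyRange ((i : Int) + s) n s = [] :=
        pvRange_nil hsZ (by omega)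
      rw [pvRange_cons hsZ hiZ]
      simp only [PySem.List.slice_from_one, List.tail_cons]
      rw [hA]
      simp only [List.map_nil, List.nil_append, List.zip_cons_cons, List.zip_nil_left,
        List.map_cons, List.map_nil]
      rw [pvQuartLoop, if_neg (by omega)]
      congr 1
      have hmin : min (i + s) n - 1 = n - 1 := by omega
      rw [hmin]
      have hn0 : 0 < n := by omega
      have e2 : (n : Int) - 1 = ((n - 1 : Nat) : Int) := by omega
      rw [e2, PySem.List.pyGetD_natCast, PySem.List.pyGetD_natCast]
      rw [pvNth_eq keys i (by omega), pvNth_eq keys (n - 1) (by omega)]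
  · rw [pvRange_nil hsZ (by exact_mod_cast Nat.le_of_not_lt h)]
    rw [pvQuartLoop, if_neg h]
    simp
termination_by n - i
decreasing_by omega

-- ===== VERDICT (by name: the statement is the Claim_ definition above) =====
theorem generate_quartiles_py_spec : Claim_equal_generate_quartiles_py := by
  intro keys _ hpre
  unfold Spec_generate_quartiles_py generate_quartiles_py generate_quartiles_py_alt
  have hn0 : keys.length ≠ 0 := by simpa using hpre
  simp only [hn0, dite_false]
  rw [pvStep_eq keys.length]
  exact pvZip keys keys.length ((keys.length + 3) / 4) (by omega) rfl hpre 0
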